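-- pv_equiv track=rewrite | github.com/DevKrishnasai/Traning | Day-07/stoling.py | recurr2
-- ===== SOURCE A (Python) =====
-- def recurr2(s):
--     if len(s)==0:
--         return 0
--     if len(s)==1:
--         return s[0]
--     if len(s)==2:
--         return max(s)
--     even = s[0]+recurr2(s[2:])
--     odd = s[1]+recurr2(s[3:])
--     return max(even,odd)
-- ===== SOURCE B (Python) =====
-- def recurr2(s):
--     # Linear DP over suffixes, right to left: a, b, c hold the answers for the
--     # suffixes starting at i+1, i+2, i+3; prev is s[i+1].
--     a, b, c = 0, 0, 0
--     prev = None
--     for x in reversed(s):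
--         if prev is None:
--             a, b, c = x, 0, 0
--         else:
--             a, b, c = max(x + b, prev + c), a, b
--         prev = x
--     return a
-- ===== Notes on version B (the rewrite author's own statement) =====
-- stated objective: alternative
-- what changed: Replaced the branching recursion on suffix slices with a right-to-left single-pass DP keeping the three latest suffix answers in rolling variables.
import Mathlib
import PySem

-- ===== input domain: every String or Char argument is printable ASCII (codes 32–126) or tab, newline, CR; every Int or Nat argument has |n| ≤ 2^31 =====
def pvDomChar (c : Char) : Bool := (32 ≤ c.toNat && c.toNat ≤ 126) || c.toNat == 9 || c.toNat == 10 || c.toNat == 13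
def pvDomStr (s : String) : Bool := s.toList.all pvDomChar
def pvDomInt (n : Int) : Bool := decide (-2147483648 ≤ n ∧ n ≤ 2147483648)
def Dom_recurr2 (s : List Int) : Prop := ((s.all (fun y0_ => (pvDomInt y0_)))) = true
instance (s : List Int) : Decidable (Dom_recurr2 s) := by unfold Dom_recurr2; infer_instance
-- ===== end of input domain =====

-- B replaces A's branching recursion on suffix slices by a single right-to-left
-- pass keeping the three latest suffix answers in rolling variables (objective: alternative).

-- ===== PORT A =====
-- Length-directed branches of A written as pattern matching; s[2:] of x::y::rest
-- is rest, s[3:] is rest.drop 1, s[0]/s[1]/max(s) are exact on each branch's shape.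
def recurr2 : List Int → Int
  | [] => 0
  | [x] => x
  | [x, y] => max x y
  | x :: y :: rest =>
    let even := x + recurr2 rest
    let odd := y + recurr2 (rest.drop 1)
    max even odd
termination_by s => s.length
decreasing_by all_goals (simp only [List.length_drop, List.length_cons]; omega)

-- ===== PORT B =====
-- one loop step of Source B: state (a, b, c, prev)
def recurr2Step (st : Int × Int × Int × Option Int) (x : Int) : Int × Int × Int × Option Int :=
  match st with
  | (a, b, c, prev) =>
    match prev with
    | none => (x, 0, 0, some x)
    | some p => (max (x + b) (p + c), a, b, some x)

def recurr2_alt (s : List Int) : Int :=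
  (s.reverse.foldl recurr2Step (0, 0, 0, none)).1

-- ===== PRECONDITION & SPEC =====
def Spec_recurr2 (s : List Int) (out : Int) : Prop := out = recurr2_alt s
instance (s : List Int) (out : Int) : Decidable (Spec_recurr2 s out) := by unfold Spec_recurr2; infer_instance

-- ===== CLAIM (what is proved, stated in full; the proofs are below) =====
def Claim_equal_recurr2 : Prop := ∀ (s : List Int), Dom_recurr2 s → Spec_recurr2 s (recurr2 s)

-- ===== LEMMAS AND PROOFS =====
lemma recurr2_fold_inv (s : List Int) :
    s.foldr (fun x st => recurr2Step st x) (0, 0, 0, none)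
      = (recurr2 s, recurr2 s.tail, recurr2 s.tail.tail, s.head?) := by
  induction s with
  | nil => simp [recurr2]
  | cons x t ih =>
    rw [List.foldr_cons, ih]
    cases t with
    | nil => simp [recurr2, recurr2Step]
    | cons y rs =>
      cases rs with
      | nil => simp [recurr2, recurr2Step]
      | cons z rs' => simp [recurr2, recurr2Step]

-- ===== VERDICT (by name: the statement is the Claim_ definition above) =====
theorem recurr2_spec : Claim_equal_recurr2 := by
  intro s _
  unfold Spec_recurr2 recurr2_alt
  rw [List.foldl_reverse, recurr2_fold_inv]
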